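-- pv_equiv track=rewrite | github.com/anna-briancon/atawa-extract-catalogue | extract.py | _group_by_page
-- ===== SOURCE A (Python) =====
-- def _group_by_page(produits: list) -> dict:
--     out = {}
--     for p in produits:
--         if not isinstance(p, dict):
--             continue
--         pg = p.get("_page") if p.get("_page") is not None else p.get("page")
--         if pg is None:
--             pg = 0
--         key = f"page_{int(pg)}"
--         out.setdefault(key, []).append(p)
--     return dict(sorted(out.items(), key=lambda x: int(x[0].split("_", 1)[1]) if x[0].split("_", 1)[1].isdigit() else 0))
-- ===== SOURCE B (Python) =====
-- def _group_by_page(produits: list) -> dict: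
--     def page_no(key):
--         # page number encoded in a "page_<n>" key; keys without a plain number rank as 0
--         suffix = key.split("_", 1)[1]
--         return int(suffix) if suffix.isdigit() else 0
--
--     groups = {}
--     ordered = []  # group keys, kept sorted by page_no at all times
--     for p in produits:
--         if not isinstance(p, dict):
--             continue
--         pg = p.get("_page")
--         if pg is None:
--             pg = p.get("page")
--         key = f"page_{int(pg) if pg is not None else 0}"
--         if key not in groups:
--             i = len(ordered)
--             while i > 0 and page_no(ordered[i - 1]) > page_no(key):
--                 i -= 1
--             ordered.insert(i, key)
--         groups.setdefault(key, []).append(p)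
--     return {k: groups[k] for k in ordered}
-- ===== Notes on version B (the rewrite author's own statement) =====
-- stated objective: alternative
-- what changed: A groups all products first and then orders the groups with a final sorted() pass over the grouped items; B keeps the list of group keys sorted at all times during a single pass (a right-to-left insertion scan places each newly seen key) and builds the result from that list, so there is no final sort.
import Mathlib
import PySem

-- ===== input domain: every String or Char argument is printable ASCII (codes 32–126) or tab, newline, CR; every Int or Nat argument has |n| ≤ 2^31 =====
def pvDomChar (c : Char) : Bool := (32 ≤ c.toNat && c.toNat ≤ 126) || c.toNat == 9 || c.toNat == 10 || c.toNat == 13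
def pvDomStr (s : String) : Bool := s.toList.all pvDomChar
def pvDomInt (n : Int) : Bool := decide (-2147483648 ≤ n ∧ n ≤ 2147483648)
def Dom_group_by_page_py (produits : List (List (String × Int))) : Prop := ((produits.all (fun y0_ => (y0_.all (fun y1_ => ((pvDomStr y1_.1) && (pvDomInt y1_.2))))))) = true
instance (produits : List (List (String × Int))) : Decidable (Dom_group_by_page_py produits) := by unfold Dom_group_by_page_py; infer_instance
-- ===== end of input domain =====

-- ===== PORT A =====
-- B replaces A's group-then-sort (a final sorted() over the grouped items) by a single pass that
-- keeps the key list sorted as it goes (right-to-left insertion scan per new key); equal return value.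

-- pg = p.get("_page") if p.get("_page") is not None else p.get("page"); if pg is None: pg = 0
def pvPgOf (p : List (String × Int)) : Int :=
  match (PySem.Dict.mk p).get? "_page" with
  | some v => v
  | none =>
    match (PySem.Dict.mk p).get? "page" with
    | some v => v
    | none => 0

-- key = f"page_{int(pg)}"   (int(pg) = pg: the value is already an int)
def pvKeyOf (p : List (String × Int)) : String := "page_" ++ PySem.Int.toStr (pvPgOf p)

-- lambda x: int(x[0].split("_", 1)[1]) if x[0].split("_", 1)[1].isdigit() else 0
-- (the .getD defaults are unreachable: every key has the form "page_<int>", so split("_",1)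
--  always yields two pieces, and int() is only applied when isdigit() holds)
def pvSortVal (k : String) : Int :=
  let suffix : String := ((PySem.Str.splitMax? k "_" 1).getD []).getD 1 ""
  if PySem.Str.strIsdigit suffix then (PySem.Int.ofStr? suffix).getD 0 else 0

-- literal port of A: group via out.setdefault(key, []).append(p), then dict(sorted(out.items(), key=…)).
-- (isinstance(p, dict) is always true at this type, so the 'continue' branch is vacuous.)
def group_by_page_py (produits : List (List (String × Int))) : List (String × List (List (String × Int))) :=
  let out := produits.foldl
    (fun d p => d.modify (pvKeyOf p) [] (· ++ [p]))
    (PySem.Dict.empty : PySem.Dict String (List (List (String × Int))))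
  (PySem.Dict.ofList (PySem.List.sorted out.items (fun x => pvSortVal x.1) false)).items

-- ===== PORT B =====
-- pg = p.get("_page"); if pg is None: pg = p.get("page")
def pvBPg (p : List (String × Int)) : Option Int :=
  match (PySem.Dict.mk p).get? "_page" with
  | some v => some v
  | none => (PySem.Dict.mk p).get? "page"

-- key = f"page_{int(pg) if pg is not None else 0}"
def pvBKey (p : List (String × Int)) : String :=
  "page_" ++ PySem.Int.toStr ((pvBPg p).getD 0)

-- def page_no(key): suffix = key.split("_", 1)[1]; return int(suffix) if suffix.isdigit() else 0
def pvPageNo (k : String) : Int :=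
  let suffix : String := ((PySem.Str.splitMax? k "_" 1).getD []).getD 1 ""
  if PySem.Str.strIsdigit suffix then (PySem.Int.ofStr? suffix).getD 0 else 0

-- i = len(ordered); while i > 0 and page_no(ordered[i-1]) > page_no(key): i -= 1
-- (ordered[i-1] is always in range here, so the getD default "" is never read)
def pvScan (ordered : List String) (kv : Int) : Nat → Nat
  | 0 => 0
  | i + 1 => if pvPageNo (ordered.getD i "") > kv then pvScan ordered kv i else i + 1

-- one iteration of B's loop over (groups, ordered)
def pvStep (st : PySem.Dict String (List (List (String × Int))) × List String)
    (p : List (String × Int)) :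
    PySem.Dict String (List (List (String × Int))) × List String :=
  (st.1.modify (pvBKey p) [] (· ++ [p]),
   if st.1.contains (pvBKey p) then st.2
   else PySem.List.insert st.2 ((pvScan st.2 (pvPageNo (pvBKey p)) st.2.length : Nat) : Int) (pvBKey p))

-- literal port of B: the single pass, then {k: groups[k] for k in ordered}
-- (groups[k] is always present for k in ordered, so the .getD default [] is never read)
def group_by_page_py_alt (produits : List (List (String × Int))) : List (String × List (List (String × Int))) :=
  let st := produits.foldl pvStep ((PySem.Dict.empty : PySem.Dict String (List (List (String × Int)))), [])
  st.2.map (fun k => (k, st.1.getD k []))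

-- ===== PRECONDITION & SPEC =====
def Spec_group_by_page_py (produits : List (List (String × Int))) (out : List (String × List (List (String × Int)))) : Prop := out = group_by_page_py_alt produits
instance (produits : List (List (String × Int))) (out : List (String × List (List (String × Int)))) : Decidable (Spec_group_by_page_py produits out) := by unfold Spec_group_by_page_py; infer_instance

-- ===== CLAIM (what is proved, stated in full; the proofs are below) =====
def Claim_equal_group_by_page_py : Prop := ∀ (produits : List (List (String × Int))), Dom_group_by_page_py produits → Spec_group_by_page_py produits (group_by_page_py produits)

-- ===== LEMMAS AND PROOFS =====

-- the two ports extract the same page value / key string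
theorem pv_bkey_eq (p : List (String × Int)) : pvBKey p = pvKeyOf p := by
  unfold pvBKey pvKeyOf pvPgOf pvBPg
  cases h1 : (PySem.Dict.mk p).get? "_page" with
  | some v => simp
  | none =>
    cases h2 : (PySem.Dict.mk p).get? "page" with
    | some v => simp
    | none => simp

theorem pv_pageno_eq : pvPageNo = pvSortVal := rfl

-- insertBy commutes with map when the comparison factors through the map
theorem pv_insertBy_map {α β : Type} (g : α → β) (before : β → β → Bool) (x : α) (s : List α) :
    PySem.List.insertBy before (g x) (s.map g)
      = (PySem.List.insertBy (fun a b => before (g a) (g b)) x s).map g := by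
  induction s with
  | nil => simp [PySem.List.insertBy]
  | cons y ys ih =>
    by_cases h : before (g x) (g y)
    · simp [PySem.List.insertBy, h]
    · simp [PySem.List.insertBy, h, ih]

-- sorted commutes with map when the sort key factors through the map
theorem pv_sorted_map {α β : Type} (l : List α) (g : α → β) (key : β → Int) :
    PySem.List.sorted (l.map g) key false
      = (PySem.List.sorted l (fun x => key (g x)) false).map g := by
  rw [PySem.List.sorted_eq_foldl_insertBy, PySem.List.sorted_eq_foldl_insertBy, List.foldl_map]
  suffices h : ∀ (s : List α),
      l.foldl (fun acc x => PySem.List.insertBy (fun a b => decide (key a < key b)) (g x) acc) (s.map g)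
        = (l.foldl (fun acc x => PySem.List.insertBy (fun a b => decide (key (g a) < key (g b))) x acc) s).map g by
    simpa using h []
  induction l with
  | nil => intro s; simp
  | cons z zs ih =>
    intro s
    simp only [List.foldl_cons]
    rw [pv_insertBy_map g (fun a b => decide (key a < key b)) z s]
    exact ih _

theorem pv_sorted_append_singleton {α : Type} (l : List α) (x : α) (key : α → Int) :
    PySem.List.sorted (l ++ [x]) key false
      = PySem.List.insertBy (fun a b => decide (key a < key b)) x (PySem.List.sorted l key false) := by
  rw [PySem.List.sorted_eq_foldl_insertBy, PySem.List.sorted_eq_foldl_insertBy, List.foldl_append]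
  rfl

theorem pv_insertBy_cons {α : Type} (before : α → α → Bool) (x y : α) (ys : List α) :
    PySem.List.insertBy before x (y :: ys)
      = if before x y then x :: y :: ys else y :: PySem.List.insertBy before x ys := by
  by_cases h : before x y <;> simp [PySem.List.insertBy, h]

-- insertBy passes over a strictly larger last element
theorem pv_insertBy_append_last {α : Type} (before : α → α → Bool) (x z : α) (l : List α)
    (h : before x z = true) :
    PySem.List.insertBy before x (l ++ [z]) = PySem.List.insertBy before x l ++ [z] := by
  induction l with
  | nil => simp [PySem.List.insertBy, h]
  | cons y ys ih =>
    rw [List.cons_append, pv_insertBy_cons, pv_insertBy_cons]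
    by_cases hy : before x y
    · simp [hy]
    · simp [hy, ih]

-- the grouping fold (out.setdefault(key, []).append(v)) characterized: keys in first-occurrence
-- order, each mapped to its class of values in original order
theorem pv_items_grp {ν : Type} (q : List (String × ν)) :
    (q.foldl (fun d r => d.modify r.1 [] (· ++ [r.2])) (PySem.Dict.empty : PySem.Dict String (List ν))).items
      = (PySem.Set.ofList (q.map Prod.fst)).map
          (fun c => (c, (q.filter (fun r => r.1 == c)).map Prod.snd)) := by
  have hnd : (q.foldl (fun d r => d.modify r.1 [] (· ++ [r.2])) (PySem.Dict.empty : PySem.Dict String (List ν))).keys.Nodup := by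
    exact PySem.Dict.nodup_keys_foldl_modify_key q Prod.fst [] (fun _ r => (· ++ [r.2])) _ (by simp)
  rw [PySem.Dict.items_eq_map_keys _ hnd []]
  have hkeys : (q.foldl (fun d r => d.modify r.1 [] (· ++ [r.2])) (PySem.Dict.empty : PySem.Dict String (List ν))).keys
      = PySem.Set.ofList (q.map Prod.fst) := by
    rw [PySem.Dict.keys_foldl_modify_key]
    simp [PySem.Dict.keys_empty]
    rfl
  rw [hkeys]
  apply List.map_congr_left
  intro c _
  rw [PySem.Dict.getD_foldl_modify_append]
  simp [PySem.Dict.getD_empty]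

-- dict(l) of a list with distinct keys returns exactly l
theorem pv_items_ofList {ν : Type} (l : List (String × ν)) (hnd : (l.map Prod.fst).Nodup) :
    (PySem.Dict.ofList l).items = l := by
  unfold PySem.Dict.ofList PySem.Dict.update
  have := PySem.Dict.items_foldl_insert_fresh l Prod.fst Prod.snd
    (PySem.Dict.empty : PySem.Dict String ν) (by simp [PySem.Dict.contains_empty]) hnd
  simpa using this

-- port A in closed form: keys sorted by page value (stable w.r.t. first occurrence), each with its class
theorem pv_A_closed (produits : List (List (String × Int))) :
    group_by_page_py produits
      = (PySem.List.sorted (PySem.Set.ofList (produits.map pvKeyOf)) pvSortVal false).map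
          (fun c => (c, produits.filter (fun p => pvKeyOf p == c))) := by
  dsimp only [group_by_page_py]
  have hfold : produits.foldl (fun d p => d.modify (pvKeyOf p) [] (· ++ [p]))
        (PySem.Dict.empty : PySem.Dict String (List (List (String × Int))))
      = (produits.map (fun p => (pvKeyOf p, p))).foldl
          (fun d r => d.modify r.1 [] (· ++ [r.2])) PySem.Dict.empty := by
    rw [List.foldl_map]
  simp only [hfold, pv_items_grp]
  have hkeys : (produits.map (fun p => (pvKeyOf p, p))).map Prod.fst = produits.map pvKeyOf := by
    rw [List.map_map]
    rfl
  have hcls : ∀ (c : String),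
      ((produits.map (fun p => (pvKeyOf p, p))).filter (fun r => r.1 == c)).map Prod.snd
        = produits.filter (fun p => pvKeyOf p == c) := by
    intro c
    rw [List.filter_map, List.map_map]
    simp [Function.comp_def]
  have hgrp : (PySem.Set.ofList ((produits.map (fun p => (pvKeyOf p, p))).map Prod.fst)).map
        (fun c => (c, ((produits.map (fun p => (pvKeyOf p, p))).filter (fun r => r.1 == c)).map Prod.snd))
      = (PySem.Set.ofList (produits.map pvKeyOf)).map
          (fun c => (c, produits.filter (fun p => pvKeyOf p == c))) := by
    rw [hkeys]
    exact List.map_congr_left (fun c _ => by rw [hcls c])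
  rw [hgrp]
  rw [pv_sorted_map (PySem.Set.ofList (produits.map pvKeyOf))
    (fun c => (c, produits.filter (fun p => pvKeyOf p == c))) (fun x => pvSortVal x.1)]
  apply pv_items_ofList
  have hfst : ((PySem.List.sorted (PySem.Set.ofList (produits.map pvKeyOf)) (fun c => pvSortVal c) false).map
        (fun c => (c, produits.filter (fun p => pvKeyOf p == c)))).map Prod.fst
      = PySem.List.sorted (PySem.Set.ofList (produits.map pvKeyOf)) (fun c => pvSortVal c) false := by
    rw [List.map_map]
    simp [Function.comp_def]
  rw [hfst]
  exact ((PySem.List.sorted_perm _ _ _).nodup_iff).mpr (PySem.Set.nodup_ofList _)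

-- the scan never reads past its starting index
theorem pv_scan_le (l : List String) (kv : Int) (i : Nat) : pvScan l kv i ≤ i := by
  induction i with
  | zero => simp [pvScan]
  | succ i ih =>
    unfold pvScan
    split
    · omega
    · omega

-- the scan only reads positions below its starting index
theorem pv_scan_append (l : List String) (z : String) (kv : Int) :
    ∀ (i : Nat), i ≤ l.length → pvScan (l ++ [z]) kv i = pvScan l kv i := by
  intro i
  induction i with
  | zero => intro _; rfl
  | succ i ih =>
    intro hi
    unfold pvScan
    rw [List.getD_append _ _ _ _ (by omega)]
    split
    · exact ih (by omega)
    · rfl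

-- B's right-to-left scan + insert is exactly insertBy into a (pairwise) sorted list
theorem pv_scan_insert (key : String) :
    ∀ (l : List String), l.Pairwise (fun a b => pvPageNo a ≤ pvPageNo b) →
      PySem.List.insert l ((pvScan l (pvPageNo key) l.length : Nat) : Int) key
        = PySem.List.insertBy (fun a b => decide (pvPageNo a < pvPageNo b)) key l := by
  intro l
  induction l using List.reverseRecOn with
  | nil => intro _; rfl
  | append_singleton l z ih =>
    intro hp
    have hpl : l.Pairwise (fun a b => pvPageNo a ≤ pvPageNo b) :=
      (List.pairwise_append.mp hp).1
    have hlast : ∀ y ∈ l, pvPageNo y ≤ pvPageNo z := by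
      intro y hy
      exact (List.pairwise_append.mp hp).2.2 y hy z (List.mem_singleton.mpr rfl)
    have hlen : (l ++ [z]).length = l.length + 1 := by simp
    rw [hlen]
    unfold pvScan
    rw [List.getD_append_right _ _ _ _ (le_refl _)]
    simp only [Nat.sub_self, List.getD_cons_zero]
    by_cases hz : pvPageNo z > pvPageNo key
    · rw [if_pos hz, pv_scan_append l z _ _ (le_refl _)]
      have hle : pvScan l (pvPageNo key) l.length ≤ l.length := pv_scan_le _ _ _
      rw [PySem.List.insert_natCast _ _ _ (by simp; omega)]
      rw [List.take_append_of_le_length hle, List.drop_append_of_le_length hle]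
      rw [pv_insertBy_append_last _ _ _ _ (by simpa using hz)]
      rw [← ih hpl, PySem.List.insert_natCast _ _ _ hle]
      simp
    · rw [if_neg hz]
      rw [PySem.List.insert_natCast _ _ _ (by simp)]
      rw [PySem.List.insertBy_of_forall_not_before]
      · rw [List.take_of_length_le (by simp)]
        simp
      · intro y hy
        rcases List.mem_append.mp hy with hy | hy
        · have := hlast y hy
          simp only [decide_eq_false_iff_not, not_lt]
          omega
        · rw [List.mem_singleton.mp hy]
          simp only [decide_eq_false_iff_not, not_lt]
          omega

-- the invariant of B's single pass: the dict is the grouping fold, the key list is the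
-- first-occurrence key set kept sorted by page number
theorem pv_B_fold (q : List (List (String × Int))) :
    q.foldl pvStep ((PySem.Dict.empty : PySem.Dict String (List (List (String × Int)))), [])
      = (q.foldl (fun d p => d.modify (pvBKey p) [] (· ++ [p])) PySem.Dict.empty,
         PySem.List.sorted (PySem.Set.ofList (q.map pvBKey)) pvPageNo false) := by
  induction q using List.reverseRecOn with
  | nil => rfl
  | append_singleton q p ih =>
    rw [List.foldl_append, List.foldl_append, ih]
    simp only [List.foldl_cons, List.foldl_nil]
    unfold pvStep
    dsimp only
    have hkeys : (q.foldl (fun d p => d.modify (pvBKey p) [] (· ++ [p]))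
        (PySem.Dict.empty : PySem.Dict String (List (List (String × Int))))).keys
        = PySem.Set.ofList (q.map pvBKey) := by
      have h1 : q.foldl (fun d p => d.modify (pvBKey p) [] (· ++ [p]))
            (PySem.Dict.empty : PySem.Dict String (List (List (String × Int))))
          = (q.map (fun p => (pvBKey p, p))).foldl
              (fun d r => d.modify r.1 [] (· ++ [r.2])) PySem.Dict.empty := by
        rw [List.foldl_map]
      rw [h1, PySem.Dict.keys_foldl_modify_key]
      simp [PySem.Dict.keys_empty]
      rfl
    have hm : List.map pvBKey (q ++ [p]) = q.map pvBKey ++ [pvBKey p] := by simp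
    rw [hm, PySem.Set.ofList_append_singleton]
    by_cases hc : (q.foldl (fun d p => d.modify (pvBKey p) [] (· ++ [p]))
        (PySem.Dict.empty : PySem.Dict String (List (List (String × Int))))).contains (pvBKey p) = true
    · have hmem : pvBKey p ∈ PySem.Set.ofList (q.map pvBKey) := by
        rw [← hkeys]
        exact (PySem.Dict.contains_iff_mem_keys _ _).mp hc
      rw [if_pos hc, PySem.Set.add_of_mem hmem]
    · have hnmem : pvBKey p ∉ PySem.Set.ofList (q.map pvBKey) := by
        rw [← hkeys]
        intro hmem
        exact hc ((PySem.Dict.contains_iff_mem_keys _ _).mpr hmem)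
      rw [if_neg hc, PySem.Set.add_of_not_mem hnmem, pv_sorted_append_singleton]
      rw [pv_scan_insert (pvBKey p) _ (by
        have := PySem.List.sorted_pairwise (PySem.Set.ofList (q.map pvBKey)) pvPageNo
        exact this)]

-- port B in the same closed form
theorem pv_B_closed (produits : List (List (String × Int))) :
    group_by_page_py_alt produits
      = (PySem.List.sorted (PySem.Set.ofList (produits.map pvKeyOf)) pvSortVal false).map
          (fun c => (c, produits.filter (fun p => pvKeyOf p == c))) := by
  dsimp only [group_by_page_py_alt]
  rw [pv_B_fold]
  have hbk : produits.map pvBKey = produits.map pvKeyOf := by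
    exact List.map_congr_left (fun p _ => pv_bkey_eq p)
  have hfold : produits.foldl (fun d p => d.modify (pvBKey p) [] (· ++ [p]))
        (PySem.Dict.empty : PySem.Dict String (List (List (String × Int))))
      = (produits.map (fun p => (pvBKey p, p))).foldl
          (fun d r => d.modify r.1 [] (· ++ [r.2])) PySem.Dict.empty := by
    rw [List.foldl_map]
  rw [hbk, pv_pageno_eq, hfold]
  apply List.map_congr_left
  intro c _
  have hD : (((produits.map (fun p => (pvBKey p, p))).foldl
        (fun d r => d.modify r.1 [] (· ++ [r.2])) PySem.Dict.empty).getD c [])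
      = produits.filter (fun p => pvKeyOf p == c) := by
    rw [PySem.Dict.getD_foldl_modify_append]
    rw [List.filter_map, List.map_map]
    simp only [PySem.Dict.getD_empty, List.nil_append]
    have : ((fun r : String × List (String × Int) => r.1 == c) ∘ fun p => (pvBKey p, p))
        = fun p => pvBKey p == c := rfl
    rw [this]
    have hfe : (fun p => pvBKey p == c) = (fun p => pvKeyOf p == c) := by
      funext p
      rw [pv_bkey_eq]
    rw [hfe]
    simp [Function.comp_def]
  rw [hD]

-- ===== VERDICT (by name: the statement is the Claim_ definition above) =====
theorem group_by_page_py_spec : Claim_equal_group_by_page_py := by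
  intro produits _
  unfold Spec_group_by_page_py
  rw [pv_A_closed, pv_B_closed]
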